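-- pv_equiv track=rewrite | github.com/KrisLloyd/CTF | ROT-i/rot.py | roti
-- ===== SOURCE A (Python) =====
-- def roti(s):
--     x = []
--     count = 0
--     for i in range(len(s)):
--         if s[i] in ["'", "!", "{", "}", "_", ".", ",", " "]:
--             count += 1
--             x.append(s[i])
--             continue
--         j = ord(s[i])
--         if s[i].isupper():
--             # ASCII 65 - 90
--             for i in range(count):
--                 j -= 1
--                 if j == 64:
--                     j = 90
--             x.append(chr(j))
--         else:
--             # ASCII 97 - 122
--             for i in range(count):
--                 j -= 1
--                 if j == 96:
--                     j = 122
--             x.append(chr(j))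
--         count += 1
--     return ''.join(x)
-- ===== SOURCE B (Python) =====
-- def roti(s):
--     out = []
--     for i, c in enumerate(s):
--         if c.isupper():
--             out.append(chr((ord(c) - ord('A') - i) % 26 + ord('A')))
--         elif c.islower():
--             out.append(chr((ord(c) - ord('a') - i) % 26 + ord('a')))
--         else:
--             out.append(c)
--     return ''.join(out)
-- ===== Notes on version B (the rewrite author's own statement) =====
-- stated objective: faster
-- what changed: Replaced the per-character inner decrement-and-wrap loop with a single modular-arithmetic shift per character; Pre_ restricts to the cipher's alphabet (ASCII letters plus the punctuation A keeps fixed), excluding characters outside it, for which no behaviour is specified: A shifts them by the index through its lowercase loop (raising ValueError in chr() when the code goes negative) while B leaves them unchanged.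
-- outside the precondition, e.g. on roti('a1'): A returns 'a0', B returns 'a1'; on roti('~~'): A returns '~}', B returns '~~'
import Mathlib
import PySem

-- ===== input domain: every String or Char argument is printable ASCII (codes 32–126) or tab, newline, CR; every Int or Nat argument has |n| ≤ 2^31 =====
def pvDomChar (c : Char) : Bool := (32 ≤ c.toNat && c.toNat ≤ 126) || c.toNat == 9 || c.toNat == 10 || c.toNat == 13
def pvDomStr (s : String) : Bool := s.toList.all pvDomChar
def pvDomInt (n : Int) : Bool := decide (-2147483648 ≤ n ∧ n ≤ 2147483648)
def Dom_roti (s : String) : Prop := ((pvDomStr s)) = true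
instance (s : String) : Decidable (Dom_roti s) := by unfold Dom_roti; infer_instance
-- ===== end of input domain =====

-- B replaces A's per-character inner decrement loop by one modular shift per character (measured asymptotically faster); proved equal on the cipher's alphabet (Pre_).


-- ===== PORT A =====
-- the list literal `["'", "!", "{", "}", "_", ".", ",", " "]`
def pvPunct : List Char := ['\'', '!', '{', '}', '_', '.', ',', ' ']

-- inner loop `for i in range(count): j -= 1; if j == 64: j = 90`
def pvDecU : Nat → Int → Int
  | 0, j => j
  | n + 1, j => pvDecU n (if j - 1 = 64 then 90 else j - 1)

-- inner loop `for i in range(count): j -= 1; if j == 96: j = 122`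
def pvDecL : Nat → Int → Int
  | 0, j => j
  | n + 1, j => pvDecL n (if j - 1 = 96 then 122 else j - 1)

-- the main `for i in range(len(s))` loop, with the running `count` (chr ported as Char.ofNat of toNat;
-- exact wherever the Python does not raise, i.e. on Pre_roti)
def pvRotiGo : List Char → Nat → List Char
  | [], _ => []
  | c :: rest, count =>
    if c ∈ pvPunct then
      c :: pvRotiGo rest (count + 1)
    else
      let j : Int := (c.toNat : Int)
      if PySem.Chars.isupper c then
        Char.ofNat (pvDecU count j).toNat :: pvRotiGo rest (count + 1)
      else
        Char.ofNat (pvDecL count j).toNat :: pvRotiGo rest (count + 1)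

def roti (s : String) : String := String.ofList (pvRotiGo s.toList 0)

-- ===== PORT B =====
-- one character of B's loop body: modular shift for letters, identity otherwise
def pvShiftB (i : Int) (c : Char) : Char :=
  if PySem.Chars.isupper c then
    Char.ofNat (PySem.Int.mod ((c.toNat : Int) - 65 - i) 26 + 65).toNat
  else if PySem.Chars.islower c then
    Char.ofNat (PySem.Int.mod ((c.toNat : Int) - 97 - i) 26 + 97).toNat
  else c

def roti_alt (s : String) : String :=
  String.ofList ((PySem.List.enumerate s.toList 0).map (fun p => pvShiftB p.1 p.2))

-- ===== PRECONDITION & SPEC =====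
-- Pre_ restricts to the cipher's alphabet — ASCII letters plus the punctuation A keeps fixed. For
-- characters outside that alphabet no behaviour is specified and either choice is defensible: A sends
-- them through its lowercase decrement loop, shifting digits/symbols by the index (and chr() raises
-- ValueError once the code goes negative), while B leaves them unchanged — so they are excluded.
def Pre_roti (s : String) : Prop :=
  (s.toList.all fun c =>
    decide (c ∈ pvPunct) || PySem.Chars.isupper c || PySem.Chars.islower c) = true
instance (s : String) : Decidable (Pre_roti s) := by unfold Pre_roti; infer_instance

def pvWitness_roti : String := "Cde!"

def Spec_roti (s : String) (out : String) : Prop := out = roti_alt s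
instance (s : String) (out : String) : Decidable (Spec_roti s out) := by unfold Spec_roti; infer_instance

-- ===== CLAIM (what is proved, stated in full; the proofs are below) =====
def Claim_equal_roti : Prop := ∀ (s : String), Dom_roti s → Pre_roti s → Spec_roti s (roti s)

-- ===== LEMMAS AND PROOFS =====

-- uppercase inner loop in closed form
theorem pvDecU_eq (n : Nat) (j : Int) (h1 : 65 ≤ j) (h2 : j ≤ 90) :
    pvDecU n j = (j - 65 - n) % 26 + 65 := by
  induction n generalizing j with
  | zero =>
    simp only [pvDecU, Nat.cast_zero, Int.sub_zero]
    rw [Int.emod_eq_of_lt (by omega) (by omega)]; omega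
  | succ n ih =>
    by_cases hj : j = 65
    · subst hj
      simp only [pvDecU, if_pos (by norm_num : (65 : Int) - 1 = 64)]
      rw [ih 90 (by omega) (by omega)]
      have : (90 - 65 - (n : Int)) % 26 = (65 - 65 - ((n : Nat) + 1 : Nat)) % 26 := by
        push_cast; omega
      rw [this]
    · have hne : j - 1 ≠ 64 := by omega
      simp only [pvDecU, if_neg hne]
      rw [ih (j - 1) (by omega) (by omega)]
      have : (j - 1 - 65 - (n : Int)) % 26 = (j - 65 - ((n : Nat) + 1 : Nat)) % 26 := by
        push_cast; ring_nf
      rw [this]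

-- lowercase inner loop in closed form, for starting code ≥ 97
theorem pvDecL_eq (n : Nat) (j : Int) (h1 : 97 ≤ j) :
    pvDecL n j = if 97 ≤ j - n then j - n else (j - 97 - n) % 26 + 97 := by
  induction n generalizing j with
  | zero => simp [pvDecL]; omega
  | succ n ih =>
    by_cases hj : j = 97
    · subst hj
      simp only [pvDecL, if_pos (by norm_num : (97 : Int) - 1 = 96)]
      rw [ih 122 (by omega)]
      have hmod : (122 - 97 - (n : Int)) % 26 = (97 - 97 - ((n : Nat) + 1 : Nat)) % 26 := by
        push_cast; omega
      by_cases hn : 97 ≤ (122 : Int) - n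
      · rw [if_pos hn, if_neg (by push_cast; omega)]
        push_cast; omega
      · rw [if_neg hn, if_neg (by push_cast; omega), hmod]
    · have hne : j - 1 ≠ 96 := by omega
      simp only [pvDecL, if_neg hne]
      rw [ih (j - 1) (by omega)]
      have h1' : (j - 1 - (n : Int)) = j - ((n : Nat) + 1 : Nat) := by push_cast; ring
      have h2' : (j - 1 - 97 - (n : Int)) % 26 = (j - 97 - ((n : Nat) + 1 : Nat)) % 26 := by
        push_cast; ring_nf
      rw [h1', h2']

theorem isupper_bounds (c : Char) (h : PySem.Chars.isupper c = true) :
    65 ≤ (c.toNat : Int) ∧ (c.toNat : Int) ≤ 90 := by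
  simp only [PySem.Chars.isupper, Bool.and_eq_true, decide_eq_true_eq, Char.le_def,
    UInt32.le_iff_toNat_le, Char.toNat] at h ⊢
  have hA : 'A'.val.toNat = 65 := rfl
  have hZ : 'Z'.val.toNat = 90 := rfl
  omega

theorem islower_bounds (c : Char) (h : PySem.Chars.islower c = true) :
    97 ≤ (c.toNat : Int) ∧ (c.toNat : Int) ≤ 122 := by
  simp only [PySem.Chars.islower, Bool.and_eq_true, decide_eq_true_eq, Char.le_def,
    UInt32.le_iff_toNat_le, Char.toNat] at h ⊢
  have ha : 'a'.val.toNat = 97 := rfl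
  have hz : 'z'.val.toNat = 122 := rfl
  omega

theorem punct_not_letter (c : Char) (h : c ∈ pvPunct) :
    PySem.Chars.isupper c = false ∧ PySem.Chars.islower c = false := by
  simp only [pvPunct, List.mem_cons, List.not_mem_nil, or_false] at h
  rcases h with rfl | rfl | rfl | rfl | rfl | rfl | rfl | rfl <;> decide

-- A's loop with counter k equals B's map over enumerate starting at k, on alphabet characters
theorem pvRotiGo_eq (l : List Char) (k : Nat)
    (hl : ∀ c ∈ l, c ∈ pvPunct ∨ PySem.Chars.isupper c = true ∨ PySem.Chars.islower c = true) :
    pvRotiGo l k = (PySem.List.enumerate l (k : Int)).map (fun p => pvShiftB p.1 p.2) := by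
  induction l generalizing k with
  | nil => simp [pvRotiGo, PySem.List.enumerate_nil]
  | cons c rest ih =>
    have hrest : ∀ c ∈ rest, c ∈ pvPunct ∨ PySem.Chars.isupper c = true ∨
        PySem.Chars.islower c = true := fun x hx => hl x (List.mem_cons_of_mem _ hx)
    have hc := hl c (List.mem_cons_self ..)
    rw [PySem.List.enumerate_cons, List.map_cons]
    have hk1 : ((k : Int) + 1) = ((k + 1 : Nat) : Int) := by push_cast; ring
    by_cases hp : c ∈ pvPunct
    · obtain ⟨hu, hlo⟩ := punct_not_letter c hp
      simp only [pvRotiGo, if_pos hp, pvShiftB, hu, hlo, Bool.false_eq_true, if_false,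
        hk1, ih _ hrest]
    · by_cases hu : PySem.Chars.isupper c = true
      · obtain ⟨hL, hR⟩ := isupper_bounds c hu
        simp only [pvRotiGo, if_neg hp, if_pos hu, pvShiftB, hk1, ih _ hrest]
        rw [pvDecU_eq k _ hL hR, PySem.Int.mod_eq_emod_of_pos (by norm_num)]
      · have hlo : PySem.Chars.islower c = true := by
          rcases hc with h | h | h
          · exact absurd h hp
          · exact absurd h (by simp [hu])
          · exact h
        obtain ⟨hL, hR⟩ := islower_bounds c hlo
        simp only [pvRotiGo, if_neg hp, if_neg hu, pvShiftB, hlo, if_true, hk1, ih _ hrest]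
        rw [pvDecL_eq k _ hL, PySem.Int.mod_eq_emod_of_pos (by norm_num)]
        by_cases h97 : 97 ≤ (c.toNat : Int) - k
        · rw [if_pos h97]
          have : ((c.toNat : Int) - 97 - k) % 26 = (c.toNat : Int) - 97 - k :=
            Int.emod_eq_of_lt (by omega) (by omega)
          rw [this]
          have : (c.toNat : Int) - k = (c.toNat : Int) - 97 - k + 97 := by ring
          rw [this]
        · rw [if_neg h97]

-- ===== VERDICT (by name: the statement is the Claim_ definition above) =====
theorem roti_spec : Claim_equal_roti := by
  intro s _ hpre
  unfold Pre_roti at hpre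
  simp only [List.all_eq_true, Bool.or_eq_true, decide_eq_true_eq] at hpre
  unfold Spec_roti roti roti_alt
  rw [pvRotiGo_eq s.toList 0 (by intro c hc; have := hpre c hc; tauto)]
  norm_num
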